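-- pv_equiv track=rewrite | github.com/aniketk33/LeetcodeSolutions | two-pointers/num-subsequences.py | num_subsequences
-- ===== SOURCE A (Python) =====
-- def num_subsequences(nums, target):
--     nums.sort()
--     result = 0
--     mod = 10 ** 9 + 7
--     right_ptr = len(nums) - 1
--
--     for left_ptr, val in enumerate(nums):
--         # get the subsequences which are less than target
--         while val + nums[right_ptr] > target and left_ptr <= right_ptr:
--             right_ptr -= 1
--
--         # add to the result using the formula 2^(right_index - left_index)
--         if left_ptr <= right_ptr:
--             result += 2 ** (right_ptr - left_ptr)
--             result %= mod
--
--     return result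
-- ===== SOURCE B (Python) =====
-- def _bisect_right(arr, x):
--     lo, hi = 0, len(arr)
--     while lo < hi:
--         mid = (lo + hi) // 2
--         if arr[mid] <= x:
--             lo = mid + 1
--         else:
--             hi = mid
--     return lo
--
--
-- def num_subsequences(nums, target):
--     nums.sort()
--     mod = 10 ** 9 + 7
--     result = 0
--     for left, val in enumerate(nums):
--         right = _bisect_right(nums, target - val) - 1
--         if right >= left:
--             result = (result + pow(2, right - left, mod)) % mod
--     return result
-- ===== Notes on version B (the rewrite author's own statement) =====
-- stated objective: faster
-- what changed: Replaces A's coordinated monotone two-pointer walk (a right pointer threaded across iterations) with an independent per-element binary search (hand-written bisect_right for the largest index whose value is <= target - val), and computes each term with modular exponentiation pow(2, e, mod) instead of A's full-precision 2**e, which builds e-bit bignums before reducing.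
import Mathlib
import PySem

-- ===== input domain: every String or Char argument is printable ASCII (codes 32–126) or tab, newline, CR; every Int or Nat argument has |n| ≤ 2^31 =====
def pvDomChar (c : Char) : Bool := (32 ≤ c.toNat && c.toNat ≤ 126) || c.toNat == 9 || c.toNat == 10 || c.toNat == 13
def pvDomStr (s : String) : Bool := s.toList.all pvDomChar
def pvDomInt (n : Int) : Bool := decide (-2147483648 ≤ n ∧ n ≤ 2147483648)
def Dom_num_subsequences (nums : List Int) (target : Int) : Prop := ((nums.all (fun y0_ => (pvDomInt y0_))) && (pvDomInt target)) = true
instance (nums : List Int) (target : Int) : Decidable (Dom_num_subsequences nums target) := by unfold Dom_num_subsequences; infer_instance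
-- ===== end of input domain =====

-- B replaces A's coordinated two-pointer walk by an independent per-element binary search; equal return
-- values, same in-place sort of `nums` in both Pythons (the equivalence proved here is about the return value).

-- ===== PORT A =====
-- A's inner while: decrement r while nums[r] + val > target and l <= r (value fetched first, as in Python)
def numSubWhile (s : List Int) (target val l : Int) : Int → Nat → Int
  | r, 0 => r
  | r, fuel+1 =>
    match PySem.List.pyGet? s r with
    | none => r  -- unreachable for the indices A's loop actually produces
    | some x => if val + x > target ∧ l ≤ r then numSubWhile s target val l (r-1) fuel else r

-- A's loop body: state (result, right_ptr), one enumerate item p = (left_ptr, val)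
def numSubStepA (s : List Int) (target md : Int) (st : Int × Int) (p : Int × Int) : Int × Int :=
  let r := numSubWhile s target p.2 p.1 st.2 ((st.2 - p.1 + 1).toNat + 1)
  if p.1 ≤ r then (PySem.Int.mod (st.1 + 2 ^ (r - p.1).toNat) md, r) else (st.1, r)

def num_subsequences (nums : List Int) (target : Int) : Int :=
  let s := PySem.List.sorted nums id
  let md : Int := 10 ^ 9 + 7
  ((PySem.List.enumerate s).foldl (numSubStepA s target md) (0, (s.length : Int) - 1)).1

-- ===== PORT B =====
-- B's loop body: r = bisect_right(nums, target - val) - 1; add pow(2, r - left, mod) when r >= left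
-- (Source B's hand-written _bisect_right is the standard bisect_right loop = PySem.List.bisectRight)
def numSubStepB (s : List Int) (target md : Int) (result : Int) (p : Int × Int) : Int :=
  let r : Int := (PySem.List.bisectRight s (target - p.2) : Int) - 1
  if p.1 ≤ r then PySem.Int.mod (result + PySem.Int.powMod 2 (r - p.1).toNat md) md else result

def num_subsequences_alt (nums : List Int) (target : Int) : Int :=
  let s := PySem.List.sorted nums id
  let md : Int := 10 ^ 9 + 7
  (PySem.List.enumerate s).foldl (numSubStepB s target md) 0

-- ===== PRECONDITION & SPEC =====
def Spec_num_subsequences (nums : List Int) (target : Int) (out : Int) : Prop := out = num_subsequences_alt nums target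
instance (nums : List Int) (target : Int) (out : Int) : Decidable (Spec_num_subsequences nums target out) := by unfold Spec_num_subsequences; infer_instance

-- ===== CLAIM (what is proved, stated in full; the proofs are below) =====
def Claim_equal_num_subsequences : Prop := ∀ (nums : List Int) (target : Int), Dom_num_subsequences nums target → Spec_num_subsequences nums target (num_subsequences nums target)

-- ===== LEMMAS AND PROOFS =====

lemma bisect_mono (s : List Int) (hs : s.Pairwise (· ≤ ·)) {x x' : Int} (h : x ≤ x') :
    PySem.List.bisectRight s x ≤ PySem.List.bisectRight s x' := by
  by_contra hlt
  push Not at hlt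
  obtain ⟨hle, h2, h3⟩ := PySem.List.bisectRight_spec s x hs
  obtain ⟨hle', h2', h3'⟩ := PySem.List.bisectRight_spec s x' hs
  have hj : PySem.List.bisectRight s x' < s.length := lt_of_lt_of_le hlt hle
  have := h2 _ hj hlt
  have := h3' _ hj (le_refl _)
  omega

lemma numSubWhile_dead (s : List Int) (target val l r : Int) (fuel : Nat)
    (h : r < l) : numSubWhile s target val l r (fuel + 1) = r := by
  unfold numSubWhile
  cases PySem.List.pyGet? s r with
  | none => rfl
  | some x => simp [not_le.mpr h]

lemma numSubWhile_spec (s : List Int) (hs : s.Pairwise (· ≤ ·)) (target val l : Int)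
    (hl : 0 ≤ l) :
    ∀ (fuel : Nat) (r : Int),
      (PySem.List.bisectRight s (target - val) : Int) - 1 ≤ r →
      l - 1 ≤ r → r ≤ (s.length : Int) - 1 → (r - l + 1).toNat < fuel →
      numSubWhile s target val l r fuel =
        max ((PySem.List.bisectRight s (target - val) : Int) - 1) (l - 1) := by
  obtain ⟨hcn, h2, h3⟩ := PySem.List.bisectRight_spec s (target - val) hs
  set c := PySem.List.bisectRight s (target - val) with hc
  intro fuel
  induction fuel with
  | zero => intro r _ _ _ hf; omega
  | succ f ih =>
    intro r hcr hlr hrn _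
    rcases lt_or_ge r l with hdead | hlive
    · rw [numSubWhile_dead s target val l r f hdead]
      omega
    · have hr0 : 0 ≤ r := le_trans hl hlive
      have hrlen : r < (s.length : Int) := by omega
      have hget := PySem.List.pyGet?_eq_some_getElem (xs := s) (i := r) hr0 hrlen
      unfold numSubWhile
      rw [hget]
      rcases lt_or_ge r (c : Int) with hsmall | hbig
      · have hrc : r.toNat < c := by omega
        have := h2 r.toNat (by omega) hrc
        have hcond : ¬ (val + s[r.toNat] > target ∧ l ≤ r) := by
          push Not; intro h'; omega
        simp only [hcond, if_false]
        omega
      · have := h3 r.toNat (by omega) (by omega)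
        have hcond : (val + s[r.toNat] > target ∧ l ≤ r) := ⟨by omega, hlive⟩
        simp only [hcond, and_self, if_true]
        exact ih (r - 1) (by omega) (by omega) (by omega) (by omega)

lemma mod_absorb (a b md : Int) (h : 0 < md) :
    PySem.Int.mod (a + PySem.Int.mod b md) md = PySem.Int.mod (a + b) md := by
  rw [PySem.Int.mod_eq_emod_of_pos h, PySem.Int.mod_eq_emod_of_pos h, PySem.Int.mod_eq_emod_of_pos h]
  conv_rhs => rw [Int.add_emod]
  rw [Int.add_emod a (b % md)]
  simp [Int.emod_emod_of_dvd]

lemma fold_eq (s : List Int) (hs : s.Pairwise (· ≤ ·)) (target md : Int) (hmd : md = 10 ^ 9 + 7) :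
    ∀ (m k : Nat) (res rp : Int), m = s.length - k → k ≤ s.length →
      rp ≤ (s.length : Int) - 1 →
      (∀ h : k < s.length, (PySem.List.bisectRight s (target - s[k]) : Int) - 1 ≤ rp) →
      ((PySem.List.enumerate (s.drop k) (k : Int)).foldl (numSubStepA s target md) (res, rp)).1
        = (PySem.List.enumerate (s.drop k) (k : Int)).foldl (numSubStepB s target md) res := by
  intro m
  induction m with
  | zero =>
    intro k res rp hm hk _ _
    have : k = s.length := by omega
    subst this
    simp [List.drop_length, PySem.List.enumerate_nil]
  | succ f ih =>
    intro k res rp hm hk hrp hinv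
    have hklen : k < s.length := by omega
    have hck := hinv hklen
    set c := PySem.List.bisectRight s (target - s[k]) with hcdef
    obtain ⟨hcn, _, _⟩ := PySem.List.bisectRight_spec s (target - s[k]) hs
    have hdrop : s.drop k = s[k] :: s.drop (k + 1) := (List.getElem_cons_drop hklen).symm
    rw [hdrop, PySem.List.enumerate_cons, List.foldl_cons, List.foldl_cons]
    have hcast : ((k : Int) + 1) = ((k + 1 : Nat) : Int) := by push_cast; ring
    -- monotonicity for the next index
    have hmono : ∀ h : k + 1 < s.length,
        (PySem.List.bisectRight s (target - s[k+1]) : Int) ≤ (c : Int) := by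
      intro h
      have hle : s[k] ≤ s[k+1] := List.pairwise_iff_getElem.mp hs k (k+1) hklen h (by omega)
      exact_mod_cast bisect_mono s hs (by omega)
    rcases lt_or_ge rp (k : Int) with hdead | hlive
    · -- right pointer already below k: both sides skip
      have hA : numSubStepA s target md (res, rp) ((k : Int), s[k]) = (res, rp) := by
        unfold numSubStepA
        simp only
        rw [numSubWhile_dead s target s[k] (k : Int) rp _ hdead]
        simp [not_le.mpr hdead]
      have hB : numSubStepB s target md res ((k : Int), s[k]) = res := by
        unfold numSubStepB
        simp only
        rw [if_neg (by omega)]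
      rw [hA, hB, hcast]
      exact ih (k+1) res rp (by omega) (by omega) hrp
        (fun h => by have := hmono h; omega)
    · -- active: the while loop lands on max (c-1) (k-1)
      have hr := numSubWhile_spec s hs target s[k] (k : Int) (by omega)
        ((rp - (k : Int) + 1).toNat + 1) rp hck (by omega) hrp (by omega)
      set r : Int := max ((c : Int) - 1) ((k : Int) - 1) with hrdef
      have hA : numSubStepA s target md (res, rp) ((k : Int), s[k]) =
          (if (k : Int) ≤ r then PySem.Int.mod (res + 2 ^ (r - (k : Int)).toNat) md else res, r) := by
        unfold numSubStepA
        simp only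
        rw [hr]
        split <;> rfl
      have hB : numSubStepB s target md res ((k : Int), s[k]) =
          (if (k : Int) ≤ r then PySem.Int.mod (res + 2 ^ (r - (k : Int)).toNat) md else res) := by
        unfold numSubStepB
        simp only
        have hguard : ((k : Int) ≤ (c : Int) - 1) ↔ ((k : Int) ≤ r) := by omega
        by_cases hg : (k : Int) ≤ r
        · rw [if_pos (hguard.mpr hg), if_pos hg]
          have : (c : Int) - 1 = r := by omega
          rw [this, PySem.Int.powMod_eq, mod_absorb _ _ _ (by omega)]
        · rw [if_neg (fun h => hg (hguard.mp h)), if_neg hg]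
      rw [hA, hB, hcast]
      exact ih (k+1) _ r (by omega) (by omega) (by omega)
        (fun h => by have := hmono h; omega)

-- ===== VERDICT (by name: the statement is the Claim_ definition above) =====
theorem num_subsequences_spec : Claim_equal_num_subsequences := by
  intro nums target _
  unfold Spec_num_subsequences num_subsequences num_subsequences_alt
  set s := PySem.List.sorted nums id with hsdef
  have hs : s.Pairwise (· ≤ ·) := PySem.List.sorted_pairwise nums id
  have h0 : s.drop 0 = s := rfl
  have := fold_eq s hs target (10 ^ 9 + 7) rfl s.length 0 0 ((s.length : Int) - 1)
    (by omega) (by omega) (by omega)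
    (fun h => by
      have := (PySem.List.bisectRight_spec s (target - s[0]) hs).1
      omega)
  simpa [h0] using this
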